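-- pv_equiv track=rewrite | github.com/Agentic-Environmental-Engineering/GymVerse | gem/gem/envs/example/game_DungeonRaidPlanning_WorkshopRoomAssignmentEnv_GEM_env.py | _combinations_up_to
-- ===== SOURCE A (Python) =====
-- from typing import Tuple, Dict, Any, Optional, List
--
-- def _combinations_up_to(items: List[str], k: int) -> List[List[str]]:
--     results: List[List[str]] = []
--     n = len(items)
--
--     def rec(start: int, curr: List[str], remaining: int):
--         if remaining == 0:
--             results.append(curr[:])
--             return
--         for idx in range(start, n):
--             curr.append(items[idx])
--             rec(idx + 1, curr, remaining - 1)
--             curr.pop()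
--
--     for size in range(1, k + 1):
--         rec(0, [], size)
--     return results
-- ===== SOURCE B (Python) =====
-- from typing import List
--
--
-- def _combos(r: int, xs: List[str]) -> List[List[str]]:
--     # choose-or-skip recursion on the list structure: either take the head or drop it
--     if r == 0:
--         return [[]]
--     if not xs:
--         return []
--     head, tail = xs[0], xs[1:]
--     return [[head] + c for c in _combos(r - 1, tail)] + _combos(r, tail)
--
--
-- def _combinations_up_to(items: List[str], k: int) -> List[List[str]]:
--     return [c for size in range(1, k + 1) for c in _combos(size, items)]
-- ===== Notes on version B (the rewrite author's own statement) =====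
-- stated objective: simpler
-- what changed: Replaced the mutable-accumulator backtracking recursion over start indices with a pure choose-or-skip recursion on the list structure plus a flat comprehension over sizes 1..k.
import Mathlib
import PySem

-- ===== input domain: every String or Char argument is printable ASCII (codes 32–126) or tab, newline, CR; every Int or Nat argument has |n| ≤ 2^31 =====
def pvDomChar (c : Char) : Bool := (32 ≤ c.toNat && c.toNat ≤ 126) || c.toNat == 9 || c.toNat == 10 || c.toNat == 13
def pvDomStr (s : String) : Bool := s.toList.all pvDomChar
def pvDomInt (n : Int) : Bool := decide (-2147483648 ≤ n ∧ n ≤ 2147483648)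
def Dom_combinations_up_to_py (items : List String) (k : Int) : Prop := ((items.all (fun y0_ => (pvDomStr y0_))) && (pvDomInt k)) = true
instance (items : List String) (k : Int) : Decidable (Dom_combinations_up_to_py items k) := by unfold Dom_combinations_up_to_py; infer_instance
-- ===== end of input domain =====

-- B replaces A's mutable-accumulator backtracking over start indices with a pure
-- choose-or-skip recursion on the list structure (simpler; same asymptotic cost).

-- ===== PORT A =====
-- rec(start, curr, remaining): 'remaining' is always a nonnegative count (it starts at
-- size ≥ 1 and is only decremented while > 0), so it is carried as a Nat.
-- items[idx] for idx in range(start, n) is always in range, so getD never hits its default.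
def pvRecA (items : List String) (start : Nat) (curr : List String) (remaining : Nat) :
    List (List String) :=
  match remaining with
  | 0 => [curr]
  | r + 1 =>
    (List.range' start (items.length - start)).foldl
      (fun acc idx => acc ++ pvRecA items (idx + 1) (curr ++ [items.getD idx ""]) r) []

def combinations_up_to_py (items : List String) (k : Int) : List (List String) :=
  (PySem.List.pyRange 1 (k + 1) 1).foldl
    (fun results size => results ++ pvRecA items 0 [] size.toNat) []

-- ===== PORT B =====
def pvCombos (r : Nat) (xs : List String) : List (List String) :=
  match r, xs with
  | 0, _ => [[]]
  | _ + 1, [] => []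
  | r + 1, x :: tail => (pvCombos r tail).map (fun c => x :: c) ++ pvCombos (r + 1) tail

def combinations_up_to_py_alt (items : List String) (k : Int) : List (List String) :=
  (PySem.List.pyRange 1 (k + 1) 1).flatMap (fun size => pvCombos size.toNat items)

-- ===== PRECONDITION & SPEC =====
def Spec_combinations_up_to_py (items : List String) (k : Int) (out : List (List String)) : Prop := out = combinations_up_to_py_alt items k
instance (items : List String) (k : Int) (out : List (List String)) : Decidable (Spec_combinations_up_to_py items k out) := by unfold Spec_combinations_up_to_py; infer_instance

-- ===== CLAIM (what is proved, stated in full; the proofs are below) =====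
def Claim_equal_combinations_up_to_py : Prop := ∀ (items : List String) (k : Int), Dom_combinations_up_to_py items k → Spec_combinations_up_to_py items k (combinations_up_to_py items k)

-- ===== LEMMAS AND PROOFS =====

-- A's rec from position `start` with prefix `curr` produces the choose-or-skip
-- combinations of the suffix `items.drop start`, each prefixed with `curr`.
theorem pvRecA_eq_combos (items : List String) :
    ∀ (r start : Nat) (curr : List String),
      pvRecA items start curr r = (pvCombos r (items.drop start)).map (fun c => curr ++ c) := by
  intro r
  induction r with
  | zero => intro start curr; simp [pvRecA, pvCombos]
  | succ r ih =>
    have inner : ∀ (m start : Nat) (curr : List String), items.length - start = m →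
        pvRecA items start curr (r + 1) =
          (pvCombos (r + 1) (items.drop start)).map (fun c => curr ++ c) := by
      intro m
      induction m with
      | zero =>
        intro start curr h
        have hs : items.length ≤ start := Nat.le_of_sub_eq_zero h
        simp [pvRecA, h, List.drop_eq_nil_of_le hs, pvCombos]
      | succ m ihm =>
        intro start curr h
        have hlt : start < items.length := by omega
        have hm : items.length - (start + 1) = m := by omega
        have hdrop : items.drop start = items[start] :: items.drop (start + 1) :=
          List.drop_eq_getElem_cons hlt
        have hrange : List.range' start (items.length - start) =
            start :: List.range' (start + 1) m := by
          rw [h]; rfl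
        have hget : items.getD start "" = items[start] := List.getD_eq_getElem items "" hlt
        have hrest : (List.range' (start + 1) m).flatMap
              (fun idx => pvRecA items (idx + 1) (curr ++ [items.getD idx ""]) r) =
            (pvCombos (r + 1) (items.drop (start + 1))).map (fun c => curr ++ c) := by
          have hc := ihm (start + 1) curr hm
          rw [show pvRecA items (start + 1) curr (r + 1) =
              (List.range' (start + 1) (items.length - (start + 1))).foldl
                (fun acc idx => acc ++ pvRecA items (idx + 1) (curr ++ [items.getD idx ""]) r)
                [] from rfl,
            PySem.List.foldl_append_eq_flatMap, hm] at hc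
          simpa using hc
        calc pvRecA items start curr (r + 1)
            = (List.range' start (items.length - start)).foldl
                (fun acc idx => acc ++ pvRecA items (idx + 1) (curr ++ [items.getD idx ""]) r)
                [] := rfl
          _ = (List.range' start (items.length - start)).flatMap
                (fun idx => pvRecA items (idx + 1) (curr ++ [items.getD idx ""]) r) := by
                rw [PySem.List.foldl_append_eq_flatMap]; simp
          _ = pvRecA items (start + 1) (curr ++ [items.getD start ""]) r ++
                (List.range' (start + 1) m).flatMap
                  (fun idx => pvRecA items (idx + 1) (curr ++ [items.getD idx ""]) r) := by
                rw [hrange]; simp [List.flatMap_cons]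
          _ = (pvCombos (r + 1) (items.drop start)).map (fun c => curr ++ c) := by
                rw [ih (start + 1) (curr ++ [items.getD start ""]), hrest, hdrop, hget]
                simp [pvCombos, Function.comp]
    intro start curr
    exact inner (items.length - start) start curr rfl

theorem pvRecA_zero (items : List String) (r : Nat) :
    pvRecA items 0 [] r = pvCombos r items := by
  rw [pvRecA_eq_combos items r 0 []]
  simp

-- ===== VERDICT (by name: the statement is the Claim_ definition above) =====
theorem combinations_up_to_py_spec : Claim_equal_combinations_up_to_py := by
  intro items k _
  unfold Spec_combinations_up_to_py combinations_up_to_py combinations_up_to_py_alt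
  rw [PySem.List.foldl_append_eq_flatMap]
  simp only [List.nil_append]
  congr 1
  funext size
  exact pvRecA_zero items size.toNat
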